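-- pv_equiv track=rewrite | github.com/KaramAlrasam/implementationsFunction | calculateNumInTwoList.py | calculate_unique_numbers
-- ===== SOURCE A (Python) =====
-- def calculate_unique_numbers( a_list:list, b_list:list)->int:
--   """return the calculation difference between the two lists."""
--   #get rid of the commen items first
--   commen_num=[num for num in a_list if num in b_list]
--   total=a_list+b_list
--   res=0
--   for num in total:
--     if num not in commen_num:
--       res+=num
--   return res
-- ===== SOURCE B (Python) =====
-- def calculate_unique_numbers(a_list: list, b_list: list) -> int:
--     """return the calculation difference between the two lists."""
--     counts_a = {}
--     for x in a_list:
--         counts_a[x] = counts_a.get(x, 0) + 1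
--     counts_b = {}
--     for y in b_list:
--         counts_b[y] = counts_b.get(y, 0) + 1
--     res = 0
--     for v, c in counts_a.items():
--         if v not in counts_b:
--             res += v * c
--     for v, c in counts_b.items():
--         if v not in counts_a:
--             res += v * c
--     return res
-- ===== Notes on version B (the rewrite author's own statement) =====
-- stated objective: faster
-- what changed: A filters the concatenated list against a quadratically built list of common elements, summing element by element; B builds frequency dictionaries for both lists once and aggregates per DISTINCT value, adding v*count(v) for each key present in exactly one dictionary.
import Mathlib
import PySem

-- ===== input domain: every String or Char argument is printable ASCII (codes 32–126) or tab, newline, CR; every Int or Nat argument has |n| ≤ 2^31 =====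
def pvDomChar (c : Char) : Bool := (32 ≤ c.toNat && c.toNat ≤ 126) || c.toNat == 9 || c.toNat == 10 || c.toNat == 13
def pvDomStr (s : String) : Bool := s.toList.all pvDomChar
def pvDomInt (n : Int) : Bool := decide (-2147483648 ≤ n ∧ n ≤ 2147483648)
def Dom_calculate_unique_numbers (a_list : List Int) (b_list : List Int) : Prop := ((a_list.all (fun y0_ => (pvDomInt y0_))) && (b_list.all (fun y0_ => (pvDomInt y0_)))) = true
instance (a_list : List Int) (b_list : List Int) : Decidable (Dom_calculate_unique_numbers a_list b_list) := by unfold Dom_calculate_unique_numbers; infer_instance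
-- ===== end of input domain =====

-- B replaces A's quadratic element-by-element filter against a common-elements list with
-- frequency dictionaries: it aggregates v * count(v) per DISTINCT value present in exactly one dict.

-- ===== PORT A =====
def calculate_unique_numbers (a_list : List Int) (b_list : List Int) : Int :=
  let commen_num := a_list.filter (fun num => num ∈ b_list)
  let total := a_list ++ b_list
  total.foldl (fun res num => if num ∈ commen_num then res else res + num) 0

-- ===== PORT B =====
-- counts[x] = counts.get(x, 0) + 1 over the list
def pvCounts (l : List Int) : PySem.Dict Int Int :=
  l.foldl (fun d x => d.insert x (d.getD x 0 + 1)) PySem.Dict.empty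

def calculate_unique_numbers_alt (a_list : List Int) (b_list : List Int) : Int :=
  let counts_a := pvCounts a_list
  let counts_b := pvCounts b_list
  let res := counts_a.items.foldl
    (fun res vc => if !counts_b.contains vc.1 then res + vc.1 * vc.2 else res) 0
  counts_b.items.foldl
    (fun res vc => if !counts_a.contains vc.1 then res + vc.1 * vc.2 else res) res

-- ===== PRECONDITION & SPEC =====
def Spec_calculate_unique_numbers (a_list : List Int) (b_list : List Int) (out : Int) : Prop := out = calculate_unique_numbers_alt a_list b_list
instance (a_list : List Int) (b_list : List Int) (out : Int) : Decidable (Spec_calculate_unique_numbers a_list b_list out) := by unfold Spec_calculate_unique_numbers; infer_instance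

-- ===== CLAIM (what is proved, stated in full; the proofs are below) =====
def Claim_equal_calculate_unique_numbers : Prop := ∀ (a_list : List Int) (b_list : List Int), Dom_calculate_unique_numbers a_list b_list → Spec_calculate_unique_numbers a_list b_list (calculate_unique_numbers a_list b_list)

-- ===== LEMMAS AND PROOFS =====

-- A's loop: fold-with-if equals the sum of the kept (non-common) elements.
theorem pv_foldl_if_sum (p : Int → Bool) (l : List Int) (r : Int) :
    l.foldl (fun res num => if p num then res else res + num) r
      = r + (l.filter (fun n => ! p n)).sum := by
  induction l generalizing r with
  | nil => simp
  | cons x xs ih =>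
      simp only [List.foldl_cons, List.filter_cons]
      by_cases h : p x = true
      · simp [h, ih]
      · simp only [Bool.not_eq_true] at h
        simp [h, ih (r + x)]
        ring

-- bumping the count of one element x ∈ s (s nodup) raises the weighted sum by x when p x
theorem pv_bump (p : Int → Bool) (f : Int → Int) (x : Int) (s : List Int)
    (hs : s.Nodup) (hx : x ∈ s) :
    ((s.filter p).map (fun v => v * (f v + if v = x then 1 else 0))).sum
      = ((s.filter p).map (fun v => v * f v)).sum + (if p x then x else 0) := by
  induction s with
  | nil => simp at hx
  | cons y t ih =>
      rcases List.nodup_cons.mp hs with ⟨hyt, hnd⟩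
      rcases List.mem_cons.mp hx with rfl | hxt
      · -- y = x; t contains no x, so the `if v = x` never fires in t
        have ht : ((t.filter p).map (fun v => v * (f v + if v = x then 1 else 0)))
            = (t.filter p).map (fun v => v * f v) := by
          apply List.map_congr_left
          intro v hv
          have hvx : v ≠ x := fun h => hyt (h ▸ (List.mem_filter.mp hv).1)
          simp [hvx]
        by_cases hp : p x = true
        · simp [hp, ht]; ring
        · simp only [Bool.not_eq_true] at hp
          simp [hp, ht]
      · have hyx : y ≠ x := fun h => hyt (h ▸ hxt)
        by_cases hp : p y = true
        · simp only [List.filter_cons, hp, if_true, List.map_cons, List.sum_cons,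
            ih hnd hxt, hyx]
          simp; ring
        · simp only [Bool.not_eq_true] at hp
          simp [hp, ih hnd hxt]

-- per-distinct-value weighted sum over a nodup superset equals the plain filtered sum
theorem pv_weighted (p : Int → Bool) (l s : List Int)
    (hs : s.Nodup) (hsub : ∀ x ∈ l, x ∈ s) :
    ((s.filter p).map (fun v => v * l.count v)).sum = (l.filter p).sum := by
  induction l with
  | nil => simp
  | cons x xs ih =>
      have hx : x ∈ s := hsub x (List.mem_cons_self ..)
      have hsub' : ∀ y ∈ xs, y ∈ s := fun y hy => hsub y (List.mem_cons_of_mem _ hy)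
      have hcnt : ∀ v : Int, ((x :: xs).count v : Int)
          = (xs.count v : Int) + (if v = x then 1 else 0) := by
        intro v
        by_cases h : v = x
        · simp [h, List.count_cons_self]
        · simp [h, Ne.symm h]
      calc ((s.filter p).map (fun v => v * ((x :: xs).count v : Int))).sum
          = ((s.filter p).map (fun v => v * ((xs.count v : Int) + if v = x then 1 else 0))).sum := by
            apply congrArg List.sum
            exact List.map_congr_left (fun v _ => by rw [hcnt v])
        _ = ((s.filter p).map (fun v => v * (xs.count v : Int))).sum + (if p x then x else 0) :=
            pv_bump p (fun v => (xs.count v : Int)) x s hs hx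
        _ = (xs.filter p).sum + (if p x then x else 0) := by rw [ih hsub']
        _ = ((x :: xs).filter p).sum := by
            by_cases hp : p x = true
            · simp [hp]; ring
            · simp only [Bool.not_eq_true] at hp
              simp [hp]

-- B's per-dict loop, for the counter of l tested against membership in m
theorem pv_alt_loop (l m : List Int) (r : Int) :
    (pvCounts l).items.foldl
        (fun res vc => if !(pvCounts m).contains vc.1 then res + vc.1 * vc.2 else res) r
      = r + (l.filter (fun x => !m.contains x)).sum := by
  have hc : pvCounts l = PySem.Dict.counter l :=
    PySem.Dict.foldl_insert_getD_add_one_eq_counter l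
  have hcm : pvCounts m = PySem.Dict.counter m :=
    PySem.Dict.foldl_insert_getD_add_one_eq_counter m
  rw [hc, hcm, PySem.Dict.items_counter]
  rw [PySem.List.foldl_if_eq_foldl_filter, PySem.List.foldl_add]
  rw [List.filter_map, List.map_map]
  rw [show ((fun vc : Int × Int => !(PySem.Dict.counter m).contains vc.1) ∘
        (fun k : Int => (k, (l.count k : Int)))) = (fun k : Int => !m.contains k) by
      funext k; simp [PySem.Dict.contains_counter]]
  rw [show ((fun vc : Int × Int => vc.1 * vc.2) ∘ (fun k : Int => (k, (l.count k : Int))))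
      = (fun k : Int => k * (l.count k : Int)) by funext k; rfl]
  rw [pv_weighted _ l (PySem.Set.ofList l) (PySem.Set.nodup_ofList l)
      (fun x hx => (PySem.Set.mem_ofList l x).mpr hx)]

-- ===== VERDICT (by name: the statement is the Claim_ definition above) =====
theorem calculate_unique_numbers_spec : Claim_equal_calculate_unique_numbers := by
  intro a_list b_list _
  show _ = _
  unfold calculate_unique_numbers calculate_unique_numbers_alt
  simp only []
  rw [pv_alt_loop a_list b_list 0, pv_alt_loop b_list a_list]
  have hA := pv_foldl_if_sum (fun n => decide (n ∈ a_list.filter (fun num => num ∈ b_list)))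
      (a_list ++ b_list) 0
  simp only [decide_eq_true_eq] at hA
  rw [hA]
  rw [List.filter_append, List.sum_append]
  have h1 : a_list.filter
        (fun n => !decide (n ∈ a_list.filter (fun num => num ∈ b_list)))
      = a_list.filter (fun x => !b_list.contains x) := by
    apply List.filter_congr
    intro x hx
    simp [List.mem_filter, hx, List.contains_eq_mem]
  have h2 : b_list.filter
        (fun n => !decide (n ∈ a_list.filter (fun num => num ∈ b_list)))
      = b_list.filter (fun x => !a_list.contains x) := by
    apply List.filter_congr
    intro x hx
    simp [List.mem_filter, hx, List.contains_eq_mem]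
  rw [h1, h2]
  ring
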